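-- pv_equiv track=rewrite | github.com/codlocker/Chatbot_skcod | api/libraries/gentemplateparsers/facebook_json_creators.py | create_for_button
-- ===== SOURCE A (Python) =====
-- def create_for_button(value):
--     ret = {}
--     if value['type'] == 'web_url':
--         ui = ['type','url','subtitle','fallback_url']
--         for i in ui:
--             if i in value:
--                 ret[i] = value[i]
--     if value['type'] == 'postback':
--         ui = ['type','title','payload']
--         for i in ui:
--             ret[i] = value[i]
--     if value['type'] == 'element_share':
--         ret['type'] = value['type']
--     return ret
-- ===== SOURCE B (Python) =====
-- # Field order per button type (used only to rank/accept keys found while scanning the input).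
-- _FIELDS = {'web_url': ('type', 'url', 'subtitle', 'fallback_url'),
--            'postback': ('type', 'title', 'payload'),
--            'element_share': ('type',)}
--
-- def create_for_button(value):
--     fields = _FIELDS.get(value['type'], ())
--     rank = {f: i for i, f in enumerate(fields)}
--     kept = [kv for kv in value.items() if kv[0] in rank]
--     kept.sort(key=lambda kv: rank[kv[0]])
--     return dict(kept)
-- ===== Notes on version B (the rewrite author's own statement) =====
-- stated objective: alternative
-- what changed: Instead of A's per-type copy loops that index the dict for each template field, B makes a single scan over the input dict's own items, keeping the keys admissible for the type, and then stable-sorts the kept pairs by the field's canonical rank.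
import Mathlib
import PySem

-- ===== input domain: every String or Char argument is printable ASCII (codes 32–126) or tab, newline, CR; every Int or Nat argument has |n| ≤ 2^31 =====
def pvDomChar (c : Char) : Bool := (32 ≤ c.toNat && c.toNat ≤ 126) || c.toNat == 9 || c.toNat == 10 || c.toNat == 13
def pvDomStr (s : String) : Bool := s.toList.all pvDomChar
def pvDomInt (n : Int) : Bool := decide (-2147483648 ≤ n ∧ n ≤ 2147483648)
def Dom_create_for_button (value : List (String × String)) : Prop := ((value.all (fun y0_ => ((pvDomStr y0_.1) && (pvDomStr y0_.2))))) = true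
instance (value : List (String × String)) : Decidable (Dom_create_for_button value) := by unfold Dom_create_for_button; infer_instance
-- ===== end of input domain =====

-- B replaces A's per-type copy loops (which index the dict for each template field) by one scan
-- over the input dict's own items followed by a stable sort by the field's canonical rank;
-- equal return values are proved on Pre_ (where A raises no KeyError).

-- ===== PORT A =====
def create_for_button (value : List (String × String)) : List (String × String) :=
  let v := PySem.Dict.mk value
  let ret : PySem.Dict String String := PySem.Dict.empty
  let t := (v.get? "type").getD ""   -- value['type']; Pre_ guarantees the key is present
  let ret := if t == "web_url" then
      ["type", "url", "subtitle", "fallback_url"].foldl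
        (fun r i => if v.contains i then r.insert i ((v.get? i).getD "") else r) ret
    else ret
  let ret := if t == "postback" then
      ["type", "title", "payload"].foldl
        (fun r i => r.insert i ((v.get? i).getD "")) ret   -- value[i]; Pre_ guarantees presence
    else ret
  let ret := if t == "element_share" then ret.insert "type" t else ret
  ret.items

-- ===== PORT B =====
-- _FIELDS: field order per button type
def pvFields : PySem.Dict String (List String) := PySem.Dict.mk
  [("web_url", ["type", "url", "subtitle", "fallback_url"]),
   ("postback", ["type", "title", "payload"]),
   ("element_share", ["type"])]

def create_for_button_alt (value : List (String × String)) : List (String × String) :=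
  let v := PySem.Dict.mk value
  let fields := (pvFields.get? ((v.get? "type").getD "")).getD []   -- _FIELDS.get(value['type'], ())
  let rank : PySem.Dict String Int :=
    PySem.Dict.mk ((PySem.List.enumerate fields).map (fun p => (p.2, p.1)))  -- {f: i for i, f in enumerate(fields)}
  let kept := v.items.filter (fun kv => rank.contains kv.1)          -- [kv for kv in value.items() if kv[0] in rank]
  PySem.List.sorted kept (fun kv => (rank.get? kv.1).getD 0) false   -- kept.sort(key=...); dict(kept) has kept's items (keys distinct)

-- ===== PRECONDITION & SPEC =====
-- Pre_ excludes exactly (a) the inputs where A raises KeyError — no 'type' key, or a postback dict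
-- missing 'title'/'payload' — and (b) lists with duplicate keys, which do not represent a Python dict
-- (the parameter is a dict, so its item list always has distinct keys).
def Pre_create_for_button (value : List (String × String)) : Prop :=
  (value.map Prod.fst).Nodup ∧
  (PySem.Dict.mk value).contains "type" = true ∧
  ((PySem.Dict.mk value).get? "type" = some "postback" →
    (PySem.Dict.mk value).contains "title" = true ∧ (PySem.Dict.mk value).contains "payload" = true)
instance (value : List (String × String)) : Decidable (Pre_create_for_button value) := by
  unfold Pre_create_for_button; infer_instance
def pvWitness_create_for_button : (List (String × String)) := [("type", "web_url"), ("url", "u")]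
def Spec_create_for_button (value : List (String × String)) (out : List (String × String)) : Prop := out = create_for_button_alt value
instance (value : List (String × String)) (out : List (String × String)) : Decidable (Spec_create_for_button value out) := by unfold Spec_create_for_button; infer_instance

-- ===== CLAIM (what is proved, stated in full; the proofs are below) =====
def Claim_equal_create_for_button : Prop := ∀ (value : List (String × String)), Dom_create_for_button value → Pre_create_for_button value → Spec_create_for_button value (create_for_button value)

-- ===== LEMMAS AND PROOFS =====

-- B's scan-and-sort, characterised: over a dict with distinct keys, sorting the items kept by a
-- rank dict equals walking the rank's field list in order and copying the present fields.
lemma sorted_filter_eq (v : PySem.Dict String String)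
    (hnd : v.keys.Nodup) (F : List String) (rank : PySem.Dict String Int)
    (hmem : ∀ k, rank.contains k = true ↔ k ∈ F)
    (hpair : F.Pairwise (fun a b => (rank.get? a).getD 0 < (rank.get? b).getD 0)) :
    PySem.List.sorted (v.items.filter (fun kv => rank.contains kv.1))
        (fun kv => (rank.get? kv.1).getD 0) false
      = (F.filter (fun i => v.contains i)).map (fun i => (i, (v.get? i).getD "")) := by
  apply PySem.List.sorted_eq_of_perm_of_pairwise_lt
  · have hFnd : F.Nodup := hpair.imp fun {a b} h => by rintro rfl; exact lt_irrefl _ h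
    have hitems : v.items.Nodup := (List.Nodup.of_map _ hnd)
    refine (List.perm_ext_iff_of_nodup ?_ (hitems.filter _)).mpr ?_
    · exact ((hFnd.filter _).map (fun a b h => congrArg Prod.fst h))
    · rintro ⟨k, w⟩
      simp only [List.mem_map, List.mem_filter]
      constructor
      · rintro ⟨i, ⟨hiF, hic⟩, heq⟩
        rw [Prod.mk.injEq] at heq
        obtain ⟨rfl, rfl⟩ := heq
        rw [PySem.Dict.contains_eq_isSome_get?] at hic
        obtain ⟨w', hw'⟩ := Option.isSome_iff_exists.mp hic
        refine ⟨?_, (hmem _).mpr hiF⟩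
        rw [hw']
        exact PySem.Dict.mem_items_of_get?_eq_some v hw'
      · rintro ⟨hkv, hkr⟩
        have hg : v.get? k = some w := PySem.Dict.get?_of_mem_items v hkv hnd
        refine ⟨k, ⟨(hmem k).mp hkr, ?_⟩, by simp [hg]⟩
        rw [PySem.Dict.contains_eq_isSome_get?, hg]; rfl
  · exact List.pairwise_map.mpr (by simpa using hpair.filter (fun i => v.contains i))

-- ===== VERDICT (by name: the statement is the Claim_ definition above) =====
theorem create_for_button_spec : Claim_equal_create_for_button := by
  intro value _ hpre
  unfold Spec_create_for_button create_for_button create_for_button_alt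
  obtain ⟨hnd, hty, hpb⟩ := hpre
  have hndk : (PySem.Dict.mk value).keys.Nodup := hnd
  revert hty hpb hndk
  generalize PySem.Dict.mk value = v
  intro hty hpb hndk
  obtain ⟨t, ht⟩ : ∃ t, v.get? "type" = some t := by
    rw [PySem.Dict.contains_eq_isSome_get?] at hty
    exact Option.isSome_iff_exists.mp hty
  simp only [ht, Option.getD_some]
  by_cases h1 : t = "web_url"
  · subst h1
    have hfl : (pvFields.get? "web_url").getD [] = ["type", "url", "subtitle", "fallback_url"] := by
      simp [pvFields, PySem.Dict.get?_mk_cons]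
    simp only [hfl]
    rw [sorted_filter_eq v hndk ["type", "url", "subtitle", "fallback_url"] _ ?_ ?_]
    · simp only [List.foldl]
      by_cases hu : v.contains "url" = true <;>
        by_cases hs : v.contains "subtitle" = true <;>
          by_cases hf : v.contains "fallback_url" = true <;>
            simp_all [PySem.Dict.insert, PySem.Dict.empty, List.filter]
    · intro k
      rw [PySem.Dict.contains_eq_decide_mem_keys, PySem.Dict.keys_mk]
      simp
    · decide
  · by_cases h2 : t = "postback"
    · subst h2
      obtain ⟨hti, hpa⟩ := hpb ht
      have hfl : (pvFields.get? "postback").getD [] = ["type", "title", "payload"] := by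
        simp [pvFields, PySem.Dict.get?_mk_cons]
      simp only [hfl]
      rw [sorted_filter_eq v hndk ["type", "title", "payload"] _ ?_ ?_]
      · simp [List.foldl, hty, hti, hpa, PySem.Dict.insert, PySem.Dict.empty, List.filter]
      · intro k
        rw [PySem.Dict.contains_eq_decide_mem_keys, PySem.Dict.keys_mk]
        simp
      · decide
    · by_cases h3 : t = "element_share"
      · subst h3
        have hfl : (pvFields.get? "element_share").getD [] = ["type"] := by
          simp [pvFields, PySem.Dict.get?_mk_cons]
        simp only [hfl]
        rw [sorted_filter_eq v hndk ["type"] _ ?_ ?_]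
        · simp [hty, ht, PySem.Dict.insert, PySem.Dict.empty, List.filter]
        · intro k
          rw [PySem.Dict.contains_eq_decide_mem_keys, PySem.Dict.keys_mk]
          simp
        · decide
      · have hfl : (pvFields.get? t).getD [] = [] := by
          simp [pvFields, Ne.symm h1, Ne.symm h2, Ne.symm h3, PySem.Dict.get?]
        simp only [hfl]
        rw [sorted_filter_eq v hndk [] _ ?_ ?_]
        · simp [h1, h2, h3, PySem.Dict.empty]
        · intro k
          rw [PySem.Dict.contains_eq_decide_mem_keys, PySem.Dict.keys_mk]
          simp
        · decide
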